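-- pv_equiv track=rewrite | github.com/stephen-th0ma5/FaceAndDigitClassification | features.py | horizontal_image_bounds_tuple
-- ===== SOURCE A (Python) =====
-- def horizontal_image_bounds_tuple(image):
--     leftMost = 1000
--     rightMost = 0
--     j = 0
--     for line in image:
--         for char in line:
--             if(char == "#" or char == "+"):
--                 if(j > rightMost):
--                     rightMost = j
--                 if(j < leftMost):
--                     leftMost = j
--             j += 1
--         j = 0
--     return [leftMost, rightMost]
-- ===== SOURCE B (Python) =====
-- def horizontal_image_bounds_tuple(image):
--     cols = [j for line in image for j, ch in enumerate(line) if ch == "#" or ch == "+"]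
--     leftMost = min(cols) if cols else 1000
--     rightMost = max(cols) if cols else 0
--     return [leftMost, rightMost]
-- ===== Notes on version B (the rewrite author's own statement) =====
-- stated objective: simpler
-- what changed: Replaces the fused running-min/max scan with mutable state by collecting all marked column indices once via enumerate and reducing them with min/max (sentinels kept for the no-mark case).
-- intended difference: On images that contain marks but only at columns > 1000, A returns leftMost = 1000 (its sentinel, an unmarked column) because its strict comparison never beats the sentinel, while B returns the true leftmost marked column, which is the intended value. — e.g. on horizontal_image_bounds_tuple([".....................................................................................................................…): A returns [1000, 1001], B returns [1001, 1001]
import Mathlib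
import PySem

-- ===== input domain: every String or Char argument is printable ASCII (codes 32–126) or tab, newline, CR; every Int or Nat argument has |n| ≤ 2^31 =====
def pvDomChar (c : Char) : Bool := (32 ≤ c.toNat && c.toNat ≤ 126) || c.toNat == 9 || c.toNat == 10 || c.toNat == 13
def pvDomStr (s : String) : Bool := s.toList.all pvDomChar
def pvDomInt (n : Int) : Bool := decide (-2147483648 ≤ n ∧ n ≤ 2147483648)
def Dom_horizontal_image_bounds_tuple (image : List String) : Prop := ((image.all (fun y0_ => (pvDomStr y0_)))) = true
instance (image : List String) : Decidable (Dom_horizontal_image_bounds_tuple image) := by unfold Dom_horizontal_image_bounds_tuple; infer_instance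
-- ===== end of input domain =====

-- B (simpler decomposition): collect all marked column indices once with enumerate, then take min/max with the
-- original empty-image sentinels; equal to A except where every mark sits beyond column 1000 (see D_ below).

-- ===== PORT A =====
def horizontal_image_bounds_tuple (image : List String) : List Int :=
  let s : Int × Int := image.foldl
    (fun (lr : Int × Int) (line : String) =>
      let t : (Int × Int) × Int := line.toList.foldl
        (fun (st : (Int × Int) × Int) (c : Char) =>
          if c == '#' || c == '+' then
            ((if st.2 < st.1.1 then st.2 else st.1.1,
              if st.2 > st.1.2 then st.2 else st.1.2), st.2 + 1)
          else (st.1, st.2 + 1))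
        (lr, (0 : Int))
      t.1)
    ((1000 : Int), (0 : Int))
  [s.1, s.2]

-- ===== PORT B =====
def horizontal_image_bounds_tuple_alt (image : List String) : List Int :=
  let cols : List Int := image.flatMap (fun line =>
    ((PySem.List.enumerate line.toList 0).filter (fun p => p.2 == '#' || p.2 == '+')).map (fun p => p.1))
  let leftMost : Int := match PySem.List.min? cols (fun x => x) with
    | some m => m
    | none => 1000
  let rightMost : Int := match PySem.List.max? cols (fun x => x) with
    | some m => m
    | none => 0
  [leftMost, rightMost]

-- ===== PRECONDITION & SPEC =====
-- On images that contain a mark but only at columns > 1000, A's running minimum never beats its 1000 sentinel and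
-- A returns leftMost = 1000 (a column that is not marked), while B returns the true leftmost marked column, the intended value.
def D_horizontal_image_bounds_tuple (image : List String) : Prop :=
  (∃ s ∈ image, 1000 < PySem.Str.find s "#" ∨ 1000 < PySem.Str.find s "+") ∧
  (∀ s ∈ image, (PySem.Str.find s "#" ≤ 1000 → PySem.Str.find s "#" = -1) ∧
    (PySem.Str.find s "+" ≤ 1000 → PySem.Str.find s "+" = -1))
instance (image : List String) : Decidable (D_horizontal_image_bounds_tuple image) := by
  unfold D_horizontal_image_bounds_tuple; infer_instance

def Spec_horizontal_image_bounds_tuple (image : List String) (out : List Int) : Prop :=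
  ¬ D_horizontal_image_bounds_tuple image → out = horizontal_image_bounds_tuple_alt image
instance (image : List String) (out : List Int) : Decidable (Spec_horizontal_image_bounds_tuple image out) := by
  unfold Spec_horizontal_image_bounds_tuple; infer_instance

def pvDiffWitness_horizontal_image_bounds_tuple : List String := [".........................................................................................................................................................................................................................................................................................................................................................................................................................................................................................................................................................................................................................................................................................................................................................................................................................................................................................................................................................................................................................................#"]
def pvDiffWitnessOut_horizontal_image_bounds_tuple : (List Int) × (List Int) := ([1000, 1001], [1001, 1001])

-- ===== CLAIM (what is proved, stated in full; the proofs are below) =====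
def Claim_unchanged_horizontal_image_bounds_tuple : Prop := ∀ (image : List String), Dom_horizontal_image_bounds_tuple image → Spec_horizontal_image_bounds_tuple image (horizontal_image_bounds_tuple image)
def Claim_changed_horizontal_image_bounds_tuple : Prop := Dom_horizontal_image_bounds_tuple (pvDiffWitness_horizontal_image_bounds_tuple) ∧ D_horizontal_image_bounds_tuple (pvDiffWitness_horizontal_image_bounds_tuple) ∧ horizontal_image_bounds_tuple (pvDiffWitness_horizontal_image_bounds_tuple) = pvDiffWitnessOut_horizontal_image_bounds_tuple.1 ∧ horizontal_image_bounds_tuple_alt (pvDiffWitness_horizontal_image_bounds_tuple) = pvDiffWitnessOut_horizontal_image_bounds_tuple.2 ∧ pvDiffWitnessOut_horizontal_image_bounds_tuple.1 ≠ pvDiffWitnessOut_horizontal_image_bounds_tuple.2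
def Claim_exact_horizontal_image_bounds_tuple : Prop := ∀ (image : List String), Dom_horizontal_image_bounds_tuple image → D_horizontal_image_bounds_tuple image → horizontal_image_bounds_tuple image ≠ horizontal_image_bounds_tuple_alt image

-- ===== LEMMAS AND PROOFS

-- ===== LEMMAS AND PROOFS =====
def pvMarked (c : Char) : Bool := c == '#' || c == '+'

def pvColsFrom : List Char → Int → List Int
  | [], _ => []
  | c :: cs, j => if pvMarked c then j :: pvColsFrom cs (j+1) else pvColsFrom cs (j+1)

def pvAllCols (image : List String) : List Int :=
  image.flatMap (fun line => pvColsFrom line.toList 0)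

def pvStep : (Int × Int) × Int → Char → (Int × Int) × Int := fun st c =>
  if c == '#' || c == '+' then
    ((if st.2 < st.1.1 then st.2 else st.1.1,
      if st.2 > st.1.2 then st.2 else st.1.2), st.2 + 1)
  else (st.1, st.2 + 1)

lemma pv_if_lt_eq_min (j l : Int) : (if j < l then j else l) = min l j := by
  rw [min_def]; split_ifs <;> omega

lemma pv_if_gt_eq_max (j r : Int) : (if j > r then j else r) = max r j := by
  rw [max_def]; split_ifs <;> omega

lemma pv_inner_eq (cs : List Char) (l r j : Int) :
    cs.foldl pvStep ((l, r), j)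
    = (((pvColsFrom cs j).foldl min l, (pvColsFrom cs j).foldl max r), j + cs.length) := by
  induction cs generalizing l r j with
  | nil => simp [pvColsFrom]
  | cons c cs ih =>
    cases hm : (c == '#' || c == '+') with
    | true =>
      have hcf : pvColsFrom (c :: cs) j = j :: pvColsFrom cs (j + 1) := by
        simp [pvColsFrom, pvMarked, hm]
      have hstep : pvStep ((l, r), j) c = ((min l j, max r j), j + 1) := by
        simp [pvStep, hm, pv_if_lt_eq_min, pv_if_gt_eq_max]
      rw [List.foldl_cons, hstep, ih, hcf, List.foldl_cons, List.foldl_cons,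
        List.length_cons]
      congr 1
      omega
    | false =>
      have hcf : pvColsFrom (c :: cs) j = pvColsFrom cs (j + 1) := by
        simp [pvColsFrom, pvMarked, hm]
      have hstep : pvStep ((l, r), j) c = ((l, r), j + 1) := by
        simp [pvStep, hm]
      rw [List.foldl_cons, hstep, ih, hcf, List.length_cons]
      congr 1
      omega

lemma pv_outer_eq (image : List String) (l r : Int) :
    image.foldl (fun (lr : Int × Int) (line : String) =>
        (line.toList.foldl pvStep (lr, (0 : Int))).1) (l, r)
    = ((pvAllCols image).foldl min l, (pvAllCols image).foldl max r) := by
  induction image generalizing l r with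
  | nil => simp [pvAllCols]
  | cons line rest ih =>
    have hc : pvAllCols (line :: rest) = pvColsFrom line.toList 0 ++ pvAllCols rest := by
      simp [pvAllCols]
    rw [List.foldl_cons, pv_inner_eq, hc, List.foldl_append, List.foldl_append, ih]

lemma pv_A_eq (image : List String) :
    horizontal_image_bounds_tuple image
      = [(pvAllCols image).foldl min 1000, (pvAllCols image).foldl max 0] := by
  unfold horizontal_image_bounds_tuple
  rw [show (fun (st : (Int × Int) × Int) (c : Char) =>
      if c == '#' || c == '+' then
        ((if st.2 < st.1.1 then st.2 else st.1.1,
          if st.2 > st.1.2 then st.2 else st.1.2), st.2 + 1)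
      else (st.1, st.2 + 1)) = pvStep from rfl]
  rw [pv_outer_eq]

lemma pv_colsB_eq (cs : List Char) (s : Int) :
    ((PySem.List.enumerate cs s).filter (fun p => p.2 == '#' || p.2 == '+')).map
        (fun p => p.1) = pvColsFrom cs s := by
  induction cs generalizing s with
  | nil => simp [PySem.List.enumerate_nil, pvColsFrom]
  | cons c cs ih =>
    rw [PySem.List.enumerate_cons]
    by_cases h : (c == '#' || c == '+') = true
    · simp [List.filter_cons, h, pvColsFrom, pvMarked, ih]
    · simp [List.filter_cons, h, pvColsFrom, pvMarked, ih]

lemma pv_B_eq (image : List String) :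
    horizontal_image_bounds_tuple_alt image
      = match pvAllCols image with
        | [] => [1000, 0]
        | x :: t => [t.foldl min x, t.foldl max x] := by
  unfold horizontal_image_bounds_tuple_alt
  have hcols : image.flatMap (fun line =>
      ((PySem.List.enumerate line.toList 0).filter (fun p => p.2 == '#' || p.2 == '+')).map
        (fun p => p.1)) = pvAllCols image := by
    unfold pvAllCols
    exact List.flatMap_congr (fun line _ => pv_colsB_eq line.toList 0)
  rw [hcols]
  cases h : pvAllCols image with
  | nil =>
    dsimp only
    rw [show PySem.List.min? ([] : List Int) (fun x => x) = none from
          (PySem.List.min?_eq_none_iff _ _).mpr rfl,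
        show PySem.List.max? ([] : List Int) (fun x => x) = none from
          (PySem.List.max?_eq_none_iff _ _).mpr rfl]
  | cons x t =>
    dsimp only
    rw [PySem.List.min?_id_cons, PySem.List.max?_id_cons]

lemma pv_foldl_min_le (xs : List Int) (a : Int) : xs.foldl min a ≤ a := by
  induction xs generalizing a with
  | nil => simp
  | cons x xs ih => exact le_trans (ih (min a x)) (min_le_left a x)

lemma pv_foldl_min_le_mem (xs : List Int) (a y : Int) (h : y ∈ xs) : xs.foldl min a ≤ y := by
  induction xs generalizing a with
  | nil => cases h
  | cons x xs ih =>
    rcases List.mem_cons.mp h with rfl | h'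
    · exact le_trans (pv_foldl_min_le xs (min a y)) (min_le_right a y)
    · exact ih (min a x) h'

lemma pv_foldl_min_init (xs : List Int) (a b : Int) :
    xs.foldl min (min a b) = min a (xs.foldl min b) := by
  induction xs generalizing b with
  | nil => simp
  | cons x xs ih => rw [List.foldl_cons, List.foldl_cons, min_assoc, ih]

lemma pv_foldl_min_of_forall (xs : List Int) (a : Int) (h : ∀ y ∈ xs, a ≤ y) :
    xs.foldl min a = a := by
  induction xs with
  | nil => rfl
  | cons x xs ih =>
    rw [List.foldl_cons, min_eq_left (h x (List.mem_cons_self))]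
    exact ih (fun y hy => h y (List.mem_cons_of_mem _ hy))

lemma pv_foldl_min_mem (t : List Int) (x : Int) : t.foldl min x ∈ x :: t := by
  induction t generalizing x with
  | nil => simp
  | cons y t ih =>
    rw [List.foldl_cons]
    rcases List.mem_cons.mp (ih (min x y)) with h | h
    · rcases min_cases x y with ⟨he, _⟩ | ⟨he, _⟩ <;> rw [h, he] <;> simp
    · exact List.mem_cons_of_mem _ (List.mem_cons_of_mem _ h)

lemma pv_foldl_max_nonneg_head (t : List Int) (x : Int) (hx : 0 ≤ x) :
    (x :: t).foldl max 0 = t.foldl max x := by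
  rw [List.foldl_cons, max_eq_right hx]

lemma pv_mem_colsFrom_iff (cs : List Char) (s y : Int) :
    y ∈ pvColsFrom cs s ↔
      ∃ p ∈ PySem.List.enumerate cs s, (p.2 = '#' ∨ p.2 = '+') ∧ p.1 = y := by
  rw [← pv_colsB_eq]
  simp only [List.mem_map, List.mem_filter]
  constructor
  · rintro ⟨p, ⟨hp, hf⟩, hy⟩
    exact ⟨p, hp, by simpa using hf, hy⟩
  · rintro ⟨p, hp, hm, hy⟩
    exact ⟨p, ⟨hp, by simpa using hm⟩, hy⟩

lemma pv_colsFrom_nonneg (cs : List Char) (s y : Int) (h : y ∈ pvColsFrom cs s) : s ≤ y := by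
  induction cs generalizing s with
  | nil => cases h
  | cons c cs ih =>
    unfold pvColsFrom at h
    by_cases hm : pvMarked c = true
    · rw [if_pos hm] at h
      rcases List.mem_cons.mp h with rfl | h'
      · exact le_refl _
      · exact le_trans (by omega) (ih (s+1) h')
    · rw [if_neg hm] at h
      exact le_trans (by omega) (ih (s+1) h)

lemma pv_allCols_nonneg (image : List String) (y : Int) (h : y ∈ pvAllCols image) : 0 ≤ y := by
  unfold pvAllCols at h
  rcases List.mem_flatMap.mp h with ⟨line, _, hy⟩
  exact pv_colsFrom_nonneg line.toList 0 y hy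

lemma pv_foldl_min_le_cons (t : List Int) (x y : Int) (h : y ∈ x :: t) :
    t.foldl min x ≤ y := by
  rcases List.mem_cons.mp h with rfl | h'
  · exact pv_foldl_min_le t y
  · exact pv_foldl_min_le_mem t x y h'

lemma pv_colsFrom_append (xs ys : List Char) (j : Int) :
    pvColsFrom (xs ++ ys) j = pvColsFrom xs j ++ pvColsFrom ys (j + xs.length) := by
  induction xs generalizing j with
  | nil => simp [pvColsFrom]
  | cons c cs ih =>
    rw [List.cons_append]
    have hoff : j + ((c :: cs).length : Int) = (j + 1) + (cs.length : Int) := by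
      simp [List.length_cons]; omega
    by_cases hm : pvMarked c = true
    · rw [show pvColsFrom (c :: (cs ++ ys)) j = j :: pvColsFrom (cs ++ ys) (j+1) from by
          rw [pvColsFrom, if_pos hm],
        show pvColsFrom (c :: cs) j = j :: pvColsFrom cs (j+1) from by
          rw [pvColsFrom, if_pos hm],
        ih, hoff, List.cons_append]
    · rw [show pvColsFrom (c :: (cs ++ ys)) j = pvColsFrom (cs ++ ys) (j+1) from by
          rw [pvColsFrom, if_neg hm],
        show pvColsFrom (c :: cs) j = pvColsFrom cs (j+1) from by
          rw [pvColsFrom, if_neg hm],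
        ih, hoff]

lemma pv_colsFrom_replicate_dot (n : Nat) (j : Int) :
    pvColsFrom (List.replicate n '.') j = [] := by
  induction n generalizing j with
  | zero => rfl
  | succ n ih =>
    rw [List.replicate_succ, pvColsFrom, if_neg (by decide)]
    exact ih _

set_option maxRecDepth 100000 in
set_option maxHeartbeats 4000000 in
lemma pv_wit_toList :
    (".........................................................................................................................................................................................................................................................................................................................................................................................................................................................................................................................................................................................................................................................................................................................................................................................................................................................................................................................................................................................................................................#" : String).toList
      = List.replicate 1001 '.' ++ ['#'] := by decide

lemma pv_cols_wit : pvColsFrom (List.replicate 1001 '.' ++ ['#']) 0 = [1001] := by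
  rw [pv_colsFrom_append, pv_colsFrom_replicate_dot, List.length_replicate]
  rw [pvColsFrom, if_pos (by decide), pvColsFrom]
  norm_num

lemma pv_allCols_wit :
    pvAllCols pvDiffWitness_horizontal_image_bounds_tuple = [1001] := by
  unfold pvDiffWitness_horizontal_image_bounds_tuple pvAllCols
  rw [List.flatMap_cons, List.flatMap_nil, List.append_nil, pv_wit_toList, pv_cols_wit]


lemma pv_singleton_infix_iff (cs : List Char) (c : Char) : [c] <:+: cs ↔ c ∈ cs := by
  constructor
  · intro h
    exact h.subset (List.mem_singleton.mpr rfl)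
  · intro h
    rcases List.append_of_mem h with ⟨l1, l2, rfl⟩
    exact ⟨l1, l2, by simp⟩

lemma pv_singleton_prefix_iff (l : List Char) (c : Char) : [c] <+: l ↔ l.head? = some c := by
  constructor
  · rintro ⟨t, rfl⟩; rfl
  · intro h
    cases l with
    | nil => cases h
    | cons a t =>
      rw [List.head?_cons, Option.some.injEq] at h
      exact ⟨t, by rw [h]; rfl⟩

lemma pv_find_spec (cs : List Char) (c : Char) (hne : PySem.Chars.find cs [c] ≠ -1) :
    0 ≤ PySem.Chars.find cs [c] ∧
    cs[(PySem.Chars.find cs [c]).toNat]? = some c ∧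
    ∀ i : Nat, i < (PySem.Chars.find cs [c]).toNat → cs[i]? ≠ some c := by
  have h := PySem.Chars.findFrom_natCast_spec cs [c] 0 (Nat.zero_le _)
    (by rw [Nat.cast_zero, PySem.Chars.findFrom_zero]; exact hne)
  rw [Nat.cast_zero, PySem.Chars.findFrom_zero] at h
  obtain ⟨h0, hpre, hmin⟩ := h
  refine ⟨h0, ?_, ?_⟩
  · rw [← List.head?_drop]
    exact (pv_singleton_prefix_iff _ _).mp hpre
  · intro i hi hci
    exact hmin i (Nat.zero_le _) hi ((pv_singleton_prefix_iff _ _).mpr (by rw [List.head?_drop]; exact hci))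

lemma pv_find_mark_le (cs : List Char) (c : Char) (k : Nat) (hk : k < cs.length) (hc : cs[k] = c) :
    PySem.Chars.find cs [c] ≠ -1 ∧ 0 ≤ PySem.Chars.find cs [c] ∧ PySem.Chars.find cs [c] ≤ (k : Int) := by
  have hne : PySem.Chars.find cs [c] ≠ -1 := by
    rw [Ne, PySem.Chars.find_eq_neg_one_iff, not_not, pv_singleton_infix_iff]
    exact hc ▸ List.getElem_mem hk
  obtain ⟨h0, _, hmin⟩ := pv_find_spec cs c hne
  refine ⟨hne, h0, ?_⟩
  by_contra hlt
  push_neg at hlt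
  have hklt : k < (PySem.Chars.find cs [c]).toNat := by omega
  exact hmin k hklt (by rw [List.getElem?_eq_getElem hk, hc])

lemma pv_find_pos_mark (cs : List Char) (c : Char) (hne : PySem.Chars.find cs [c] ≠ -1) :
    ∃ k : Nat, ∃ h : k < cs.length, cs[k] = c ∧ PySem.Chars.find cs [c] = (k : Int) := by
  obtain ⟨h0, hget, _⟩ := pv_find_spec cs c hne
  have hk : (PySem.Chars.find cs [c]).toNat < cs.length := by
    by_contra hge
    rw [List.getElem?_eq_none (by omega)] at hget
    cases hget
  refine ⟨(PySem.Chars.find cs [c]).toNat, hk, ?_, by omega⟩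
  rw [List.getElem?_eq_getElem hk, Option.some.injEq] at hget
  exact hget


lemma pv_str_find (s sub : String) (c : Char) (hs : sub.toList = [c]) :
    PySem.Str.find s sub = PySem.Chars.find s.toList [c] := by
  unfold PySem.Str.find
  rw [hs]

lemma pv_mem_cols_idx (cs : List Char) (y : Int) :
    y ∈ pvColsFrom cs 0 ↔
      ∃ k : Nat, ∃ h : k < cs.length, (cs[k] = '#' ∨ cs[k] = '+') ∧ y = (k : Int) := by
  rw [pv_mem_colsFrom_iff]
  constructor
  · rintro ⟨p, hp, hm, rfl⟩
    rcases (PySem.List.mem_enumerate_iff _ _ _).mp hp with ⟨k, hk, rfl⟩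
    exact ⟨k, hk, by simpa using hm, by simp⟩
  · rintro ⟨k, hk, hm, rfl⟩
    exact ⟨((0 : Int) + k, cs[k]), (PySem.List.mem_enumerate_iff _ _ _).mpr ⟨k, hk, rfl⟩,
      by simpa using hm, by simp⟩

lemma pv_mem_allCols_iff (image : List String) (y : Int) :
    y ∈ pvAllCols image ↔
      ∃ s ∈ image, ∃ k : Nat, ∃ h : k < s.toList.length,
        (s.toList[k] = '#' ∨ s.toList[k] = '+') ∧ y = (k : Int) := by
  unfold pvAllCols
  rw [List.mem_flatMap]
  constructor
  · rintro ⟨line, hline, hy⟩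
    exact ⟨line, hline, (pv_mem_cols_idx _ _).mp hy⟩
  · rintro ⟨line, hline, hy⟩
    exact ⟨line, hline, (pv_mem_cols_idx _ _).mpr hy⟩

lemma pv_hash_toList : ("#" : String).toList = ['#'] := by decide

lemma pv_plus_toList : ("+" : String).toList = ['+'] := by decide

-- a mark at column k forces that character's find to be a mark position ≤ k (and ≠ -1)
lemma pv_mark_find (s : String) (k : Nat) (hk : k < s.toList.length)
    (hm : s.toList[k] = '#' ∨ s.toList[k] = '+') :
    (PySem.Str.find s "#" ≠ -1 ∧ 0 ≤ PySem.Str.find s "#" ∧ PySem.Str.find s "#" ≤ (k : Int)) ∨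
    (PySem.Str.find s "+" ≠ -1 ∧ 0 ≤ PySem.Str.find s "+" ∧ PySem.Str.find s "+" ≤ (k : Int)) := by
  rcases hm with hm | hm
  · left
    rw [pv_str_find s "#" '#' pv_hash_toList]
    exact pv_find_mark_le s.toList '#' k hk hm
  · right
    rw [pv_str_find s "+" '+' pv_plus_toList]
    exact pv_find_mark_le s.toList '+' k hk hm

-- under D_'s second conjunct every marked column of the image exceeds 1000
lemma pv_D_all_big (image : List String)
    (hall : ∀ s ∈ image, (PySem.Str.find s "#" ≤ 1000 → PySem.Str.find s "#" = -1) ∧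
      (PySem.Str.find s "+" ≤ 1000 → PySem.Str.find s "+" = -1))
    (y : Int) (hy : y ∈ pvAllCols image) : 1000 < y := by
  rcases (pv_mem_allCols_iff image y).mp hy with ⟨s, hs, k, hk, hm, rfl⟩
  rcases pv_mark_find s k hk hm with ⟨hne, _, hle⟩ | ⟨hne, _, hle⟩
  · by_contra hc
    push_neg at hc
    exact hne ((hall s hs).1 (by omega))
  · by_contra hc
    push_neg at hc
    exact hne ((hall s hs).2 (by omega))

-- under D_'s first conjunct the image has a marked column
lemma pv_D_ex_mem (image : List String)
    (hex : ∃ s ∈ image, 1000 < PySem.Str.find s "#" ∨ 1000 < PySem.Str.find s "+") :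
    ∃ y, y ∈ pvAllCols image := by
  rcases hex with ⟨s, hs, hf | hf⟩
  · rw [pv_str_find s "#" '#' pv_hash_toList] at hf
    rcases pv_find_pos_mark s.toList '#' (by omega) with ⟨k, hk, hc, _⟩
    exact ⟨k, (pv_mem_allCols_iff image _).mpr ⟨s, hs, k, hk, Or.inl hc, rfl⟩⟩
  · rw [pv_str_find s "+" '+' pv_plus_toList] at hf
    rcases pv_find_pos_mark s.toList '+' (by omega) with ⟨k, hk, hc, _⟩
    exact ⟨k, (pv_mem_allCols_iff image _).mpr ⟨s, hs, k, hk, Or.inr hc, rfl⟩⟩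

lemma pv_wit_get_lt (i : Nat) (hi : i < 1001) :
    (List.replicate 1001 '.' ++ ['#'])[i]? = some '.' := by
  rw [List.getElem?_append_left (by rw [List.length_replicate]; omega),
    List.getElem?_replicate]
  rw [if_pos hi]
lemma pv_wit_len : (List.replicate 1001 '.' ++ ['#']).length = 1002 := by
  rw [List.length_append, List.length_replicate]
  rfl
lemma pv_wit_get_1001 (h : 1001 < (List.replicate 1001 '.' ++ ['#']).length) :
    (List.replicate 1001 '.' ++ ['#'])[1001] = '#' := by
  have h2 : (List.replicate 1001 '.' ++ ['#'])[1001]? = some '#' := by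
    rw [List.getElem?_append_right (by rw [List.length_replicate])]
    rw [List.length_replicate]
    rfl
  rw [List.getElem?_eq_getElem h] at h2
  injection h2

lemma pv_wit_find_hash : PySem.Str.find ".........................................................................................................................................................................................................................................................................................................................................................................................................................................................................................................................................................................................................................................................................................................................................................................................................................................................................................................................................................................................................................................#" "#" = 1001 := by
  rw [pv_str_find _ _ '#' pv_hash_toList, pv_wit_toList]
  have hlen := pv_wit_len
  have hk : 1001 < (List.replicate 1001 '.' ++ ['#']).length := by omega
  obtain ⟨hne, h0, hle⟩ :=
    pv_find_mark_le (List.replicate 1001 '.' ++ ['#']) '#' 1001 hk (pv_wit_get_1001 hk)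
  obtain ⟨-, hget, -⟩ := pv_find_spec (List.replicate 1001 '.' ++ ['#']) '#' hne
  by_contra hne2
  have hlt : (PySem.Chars.find (List.replicate 1001 '.' ++ ['#']) ['#']).toNat < 1001 := by omega
  rw [pv_wit_get_lt _ hlt] at hget
  exact absurd (by injection hget) (by decide)

lemma pv_wit_find_plus : PySem.Str.find ".........................................................................................................................................................................................................................................................................................................................................................................................................................................................................................................................................................................................................................................................................................................................................................................................................................................................................................................................................................................................................................................#" "+" = -1 := by
  rw [pv_str_find _ _ '+' pv_plus_toList, pv_wit_toList]
  rw [PySem.Chars.find_eq_neg_one_iff, pv_singleton_infix_iff]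
  intro h
  rcases List.mem_append.mp h with h' | h'
  · exact absurd (List.eq_of_mem_replicate h') (by decide)
  · exact absurd (List.mem_singleton.mp h') (by decide)

-- ===== VERDICT (by name: the statement is the Claim_ definition above) =====
theorem horizontal_image_bounds_tuple_spec : Claim_unchanged_horizontal_image_bounds_tuple := by
  intro image _ hnd
  show horizontal_image_bounds_tuple image = horizontal_image_bounds_tuple_alt image
  rw [pv_A_eq, pv_B_eq]
  cases h : pvAllCols image with
  | nil => simp
  | cons x t =>
    have hx0 : (0 : Int) ≤ x :=
      pv_allCols_nonneg image x (h ▸ List.mem_cons_self)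
    have hy : ∃ y ∈ pvAllCols image, y ≤ 1000 := by
      by_cases hall : ∀ s ∈ image, (PySem.Str.find s "#" ≤ 1000 → PySem.Str.find s "#" = -1) ∧
          (PySem.Str.find s "+" ≤ 1000 → PySem.Str.find s "+" = -1)
      · -- then D_'s first conjunct must fail, yet the image has a mark: contradiction
        exfalso
        have hxmem : x ∈ pvAllCols image := h ▸ List.mem_cons_self
        rcases (pv_mem_allCols_iff image x).mp hxmem with ⟨s, hs, k, hk, hm, rfl⟩
        rcases pv_mark_find s k hk hm with ⟨hne, _, _⟩ | ⟨hne, _, _⟩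
        · have hgt : 1000 < PySem.Str.find s "#" := by
            by_contra hc; push_neg at hc; exact hne ((hall s hs).1 hc)
          exact hnd ⟨⟨s, hs, Or.inl hgt⟩, hall⟩
        · have hgt : 1000 < PySem.Str.find s "+" := by
            by_contra hc; push_neg at hc; exact hne ((hall s hs).2 hc)
          exact hnd ⟨⟨s, hs, Or.inr hgt⟩, hall⟩
      · push_neg at hall
        rcases hall with ⟨s, hs, hbad⟩
        rcases Classical.em (PySem.Str.find s "#" ≤ 1000 ∧ PySem.Str.find s "#" ≠ -1) with hbs | hbs
        · obtain ⟨hle, hne⟩ := hbs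
          rw [pv_str_find s "#" '#' pv_hash_toList] at hle hne
          rcases pv_find_pos_mark s.toList '#' hne with ⟨k, hk, hc, hfk⟩
          exact ⟨k, (pv_mem_allCols_iff image _).mpr ⟨s, hs, k, hk, Or.inl hc, rfl⟩, by omega⟩
        · have hbp : PySem.Str.find s "+" ≤ 1000 ∧ PySem.Str.find s "+" ≠ -1 := by tauto
          obtain ⟨hle, hne⟩ := hbp
          rw [pv_str_find s "+" '+' pv_plus_toList] at hle hne
          rcases pv_find_pos_mark s.toList '+' hne with ⟨k, hk, hc, hfk⟩
          exact ⟨k, (pv_mem_allCols_iff image _).mpr ⟨s, hs, k, hk, Or.inr hc, rfl⟩, by omega⟩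
    rcases hy with ⟨y, hy, hyle⟩
    rw [h] at hy
    have hM : t.foldl min x ≤ 1000 :=
      le_trans (pv_foldl_min_le_cons t x y hy) hyle
    have hleft : (x :: t).foldl min 1000 = t.foldl min x := by
      rw [List.foldl_cons, pv_foldl_min_init, min_eq_right hM]
    rw [hleft, pv_foldl_max_nonneg_head t x hx0]

theorem horizontal_image_bounds_tuple_changed : Claim_changed_horizontal_image_bounds_tuple := by
  unfold Claim_changed_horizontal_image_bounds_tuple
  have hf1 := pv_wit_find_hash
  have hf2 := pv_wit_find_plus
  refine ⟨?_, ⟨?_, ?_⟩, ?_, ?_, by decide⟩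
  · -- Dom
    unfold Dom_horizontal_image_bounds_tuple pvDiffWitness_horizontal_image_bounds_tuple
    simp only [List.all_cons, List.all_nil, Bool.and_true]
    unfold pvDomStr
    rw [pv_wit_toList, List.all_eq_true]
    intro c hc
    rcases List.mem_append.mp hc with h' | h'
    · rw [List.eq_of_mem_replicate h']; decide
    · rw [List.mem_singleton.mp h']; decide
  · -- D_: a first mark beyond column 1000 exists
    unfold pvDiffWitness_horizontal_image_bounds_tuple
    exact ⟨_, List.mem_singleton.mpr rfl, Or.inl (by rw [hf1]; norm_num)⟩
  · -- D_: no line has a mark at column ≤ 1000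
    intro s hs
    unfold pvDiffWitness_horizontal_image_bounds_tuple at hs
    rw [List.mem_singleton] at hs
    subst hs
    refine ⟨fun hle => ?_, fun _ => hf2⟩
    rw [hf1] at hle
    omega
  · -- A's value
    rw [pv_A_eq, pv_allCols_wit]
    unfold pvDiffWitnessOut_horizontal_image_bounds_tuple
    norm_num
  · -- B's value
    rw [pv_B_eq, pv_allCols_wit]
    unfold pvDiffWitnessOut_horizontal_image_bounds_tuple
    norm_num

theorem horizontal_image_bounds_tuple_tight : Claim_exact_horizontal_image_bounds_tuple := by
  intro image _ hd heq
  obtain ⟨hex, hall⟩ := hd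
  rw [pv_A_eq, pv_B_eq] at heq
  cases h : pvAllCols image with
  | nil =>
    rcases pv_D_ex_mem image hex with ⟨y, hy⟩
    rw [h] at hy
    cases hy
  | cons x t =>
    rw [h] at heq
    have hbig : ∀ y ∈ x :: t, (1000 : Int) < y := by
      intro y hy
      exact pv_D_all_big image hall y (h ▸ hy)
    have hA : (x :: t).foldl min 1000 = 1000 :=
      pv_foldl_min_of_forall (x :: t) 1000 (fun y hy => le_of_lt (hbig y hy))
    have hB : 1000 < t.foldl min x :=
      hbig _ (pv_foldl_min_mem t x)
    rw [hA] at heq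
    have := (List.cons.injEq _ _ _ _).mp heq |>.1
    omega
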